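-- pv_equiv track=rewrite | github.com/wooodyyan/EA_rpg_game | EA_RPG_GAME/rpg_python_game_v6.py | seed_center_with_grass
-- ===== SOURCE A (Python) =====
-- CENTER_ZONE_RADIUS = 3
--
-- def seed_center_with_grass(map_data, radius=CENTER_ZONE_RADIUS):
--
--     rows = len(map_data)
--     cols = len(map_data[0])
--     row_mid = rows // 2
--     col_mid = cols // 2
--
--     r_min = max(row_mid - radius, 0)
--     r_max = min(row_mid + radius, rows - 1)
--     c_min = max(col_mid - radius, 0)
--     c_max = min(col_mid + radius, cols - 1)
--
--     out = []
--     for r in range(rows):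
--         row_list = list(map_data[r])
--         for c in range(cols):
--             if r_min <= r <= r_max and c_min <= c <= c_max:
--                 row_list[c] = '2'
--         out.append("".join(row_list))
--     return out
-- ===== SOURCE B (Python) =====
-- CENTER_ZONE_RADIUS = 3
--
-- def seed_center_with_grass(map_data, radius=CENTER_ZONE_RADIUS):
--     rows = len(map_data)
--     cols = len(map_data[0])
--     r_min = max(rows // 2 - radius, 0)
--     r_max = min(rows // 2 + radius, rows - 1)
--     c_min = max(cols // 2 - radius, 0)
--     c_max = min(cols // 2 + radius, cols - 1)
--     if r_max < r_min or c_max < c_min: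
--         return list(map_data)
--     band = '2' * (c_max - c_min + 1)
--     mid = [map_data[r][:c_min] + band + map_data[r][c_max + 1:]
--            for r in range(r_min, r_max + 1)]
--     return map_data[:r_min] + mid + map_data[r_max + 1:]
-- ===== Notes on version B (the rewrite author's own statement) =====
-- stated objective: simpler
-- what changed: A's full per-cell double loop (a zone test executed for every cell of the grid) is replaced by a three-segment construction: the row list is split at the zone bounds, only the in-zone band of rows is rebuilt once each via slicing (row[:c_min] + '2'*width + row[c_max+1:]), and the rows above and below the zone are passed through as untouched list slices; an empty zone returns a copy immediately.
import Mathlib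
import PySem

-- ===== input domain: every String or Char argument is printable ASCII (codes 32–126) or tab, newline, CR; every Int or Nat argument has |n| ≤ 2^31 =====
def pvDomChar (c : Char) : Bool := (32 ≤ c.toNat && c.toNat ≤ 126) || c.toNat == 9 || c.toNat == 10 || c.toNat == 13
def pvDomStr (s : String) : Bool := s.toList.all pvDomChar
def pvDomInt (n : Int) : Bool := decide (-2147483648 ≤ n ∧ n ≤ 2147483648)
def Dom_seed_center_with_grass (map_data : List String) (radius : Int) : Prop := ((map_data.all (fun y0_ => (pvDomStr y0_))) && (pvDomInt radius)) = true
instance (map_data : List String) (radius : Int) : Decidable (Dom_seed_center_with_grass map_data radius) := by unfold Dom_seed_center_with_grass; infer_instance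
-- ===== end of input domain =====

-- B replaces A's per-cell double loop by a three-segment construction: the row list is split at the zone
-- bounds, only the in-zone rows are rebuilt (once each, via slicing) and the rest is passed through as slices.

-- ===== PORT A =====
-- map_data[0] raises IndexError on empty map_data (excluded by Pre_); ported as headD "".
-- row_list[c] = '2' raises IndexError when c ≥ len(row); Pre_ guarantees every touched index is in range,
-- so it is ported as List.set (a no-op out of range).
def seed_center_with_grass (map_data : List String) (radius : Int) : List String :=
  let rows : Int := map_data.length
  let cols : Int := PySem.Str.len (map_data.headD "")
  let row_mid := PySem.Int.floordiv rows 2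
  let col_mid := PySem.Int.floordiv cols 2
  let r_min := max (row_mid - radius) 0
  let r_max := min (row_mid + radius) (rows - 1)
  let c_min := max (col_mid - radius) 0
  let c_max := min (col_mid + radius) (cols - 1)
  (PySem.List.pyRange 0 rows 1).foldl (fun out r =>
    let row_list := (PySem.List.pyGetD map_data r "").toList
    let row_list := (PySem.List.pyRange 0 cols 1).foldl (fun rl c =>
      if r_min ≤ r ∧ r ≤ r_max ∧ c_min ≤ c ∧ c ≤ c_max then rl.set c.toNat '2' else rl) row_list
    out ++ [String.ofList row_list]) []

-- ===== PORT B =====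
-- '2' * n is ported by hand as String.ofList (List.replicate n.toNat '2'): exact, since here n ≥ 1.
def seed_center_with_grass_alt (map_data : List String) (radius : Int) : List String :=
  let rows : Int := map_data.length
  let cols : Int := PySem.Str.len (map_data.headD "")
  let r_min := max (PySem.Int.floordiv rows 2 - radius) 0
  let r_max := min (PySem.Int.floordiv rows 2 + radius) (rows - 1)
  let c_min := max (PySem.Int.floordiv cols 2 - radius) 0
  let c_max := min (PySem.Int.floordiv cols 2 + radius) (cols - 1)
  if r_max < r_min ∨ c_max < c_min then map_data
  else
    let band := String.ofList (List.replicate (c_max - c_min + 1).toNat '2')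
    let mid := (PySem.List.pyRange r_min (r_max + 1) 1).map (fun r =>
      PySem.Str.slice (PySem.List.pyGetD map_data r "") none (some c_min) ++ band
        ++ PySem.Str.slice (PySem.List.pyGetD map_data r "") (some (c_max + 1)) none)
    PySem.List.slice map_data none (some r_min) ++ mid ++ PySem.List.slice map_data (some (r_max + 1)) none

-- ===== PRECONDITION & SPEC =====
-- the zone bounds (r_min, r_max, c_min, c_max) both programs compute, as a standalone helper for Pre_
def pvZone (map_data : List String) (radius : Int) : Int × Int × Int × Int :=
  let rows : Int := map_data.length
  let cols : Int := PySem.Str.len (map_data.headD "")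
  let row_mid := PySem.Int.floordiv rows 2
  let col_mid := PySem.Int.floordiv cols 2
  (max (row_mid - radius) 0, min (row_mid + radius) (rows - 1),
   max (col_mid - radius) 0, min (col_mid + radius) (cols - 1))

-- Pre_ excludes exactly the inputs where A raises IndexError: the empty map, and maps where some row inside
-- the (nonempty) centre zone is shorter than c_max+1, so the per-cell assignment runs off the row's end.
def Pre_seed_center_with_grass (map_data : List String) (radius : Int) : Prop :=
  map_data ≠ [] ∧ ∀ r : Nat, r < map_data.length →
    (pvZone map_data radius).1 ≤ (r : Int) → (r : Int) ≤ (pvZone map_data radius).2.1 →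
    (pvZone map_data radius).2.2.1 ≤ (pvZone map_data radius).2.2.2 →
    (pvZone map_data radius).2.2.2 < ((map_data.getD r "").toList.length : Int)
instance (map_data : List String) (radius : Int) : Decidable (Pre_seed_center_with_grass map_data radius) := by unfold Pre_seed_center_with_grass; infer_instance

def pvWitness_seed_center_with_grass : List String × Int := (["aaa", "aaa", "aaa"], 1)

def Spec_seed_center_with_grass (map_data : List String) (radius : Int) (out : List String) : Prop := out = seed_center_with_grass_alt map_data radius
instance (map_data : List String) (radius : Int) (out : List String) : Decidable (Spec_seed_center_with_grass map_data radius out) := by unfold Spec_seed_center_with_grass; infer_instance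

-- ===== CLAIM (what is proved, stated in full; the proofs are below) =====
def Claim_equal_seed_center_with_grass : Prop := ∀ (map_data : List String) (radius : Int), Dom_seed_center_with_grass map_data radius → Pre_seed_center_with_grass map_data radius → Spec_seed_center_with_grass map_data radius (seed_center_with_grass map_data radius)

-- ===== LEMMAS AND PROOFS =====

-- elementwise description of A's inner loop: a fold that sets index c to '2' whenever p c holds
lemma foldl_set_getElem? (p : Int → Prop) [DecidablePred p] (idxs : List Int)
    (h : ∀ c ∈ idxs, 0 ≤ c) (l : List Char) (i : Nat) :
    (idxs.foldl (fun rl c => if p c then rl.set c.toNat '2' else rl) l)[i]? =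
      if p (i : Int) ∧ (i : Int) ∈ idxs ∧ i < l.length then some '2' else l[i]? := by
  induction idxs generalizing l with
  | nil => simp
  | cons c cs ih =>
    have hc : 0 ≤ c := h c (by simp)
    rw [List.foldl_cons, ih (fun x hx => h x (by simp [hx]))]
    by_cases hpc : p c
    · simp only [if_pos hpc, List.length_set, List.getElem?_set, List.mem_cons]
      by_cases hci : c = (i : Int)
      · have hti : c.toNat = i := by omega
        have hpi : p (i : Int) := hci ▸ hpc
        simp only [hti, ← hci]
        by_cases hlt : i < l.length
        · simp [hlt, hci, hpi]
        · simp [hlt, hci, hpi]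
      · have hti : ¬ (c.toNat = i) := by omega
        have hic : ¬ ((i : Int) = c) := fun hx => hci hx.symm
        simp [hti, hic]
    · simp only [if_neg hpc, List.mem_cons]
      by_cases hci : (i : Int) = c
      · have hnp : ¬ p (i : Int) := fun hp => hpc (hci ▸ hp)
        simp [hnp]
      · simp [hci]

-- A's inner loop on an in-zone row equals B's slice rebuild
lemma inner_fold_eq (cols c_min c_max : Int) (l : List Char)
    (h0 : 0 ≤ c_min) (h1 : c_min ≤ c_max) (h2 : c_max < cols) (h3 : c_max < (l.length : Int)) :
    (PySem.List.pyRange 0 cols 1).foldl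
        (fun rl c => if c_min ≤ c ∧ c ≤ c_max then rl.set c.toNat '2' else rl) l
      = l.take c_min.toNat ++ List.replicate (c_max - c_min + 1).toNat '2' ++ l.drop (c_max + 1).toNat := by
  apply List.ext_getElem?
  intro i
  rw [foldl_set_getElem? (fun c => c_min ≤ c ∧ c ≤ c_max) _
        (fun c hc => ((PySem.List.mem_pyRange_one).mp hc).1) l i]
  simp only [PySem.List.mem_pyRange_one, List.getElem?_append, List.length_append,
    List.length_take, List.length_replicate, List.getElem?_take, List.getElem?_drop,
    List.getElem?_replicate]
  split_ifs <;> first | rfl | (congr 1; omega)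

-- A's inner loop is the identity when the zone test can never fire on this row
lemma inner_fold_noop (cols : Int) (q : Int → Prop) [DecidablePred q] (l : List Char)
    (hq : ∀ c, ¬ q c) :
    (PySem.List.pyRange 0 cols 1).foldl (fun rl c => if q c then rl.set c.toNat '2' else rl) l = l := by
  apply List.ext_getElem?
  intro i
  rw [foldl_set_getElem? q _ (fun c hc => ((PySem.List.mem_pyRange_one).mp hc).1) l i]
  simp [hq]

-- reading a range of indices out of a list is drop-of-take
lemma map_pyGetD_pyRange_seg {α : Type} (xs : List α) (d : α) (a b : Int)
    (h0 : 0 ≤ a) (hb : b ≤ (xs.length : Int)) :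
    (PySem.List.pyRange a b 1).map (fun j => PySem.List.pyGetD xs j d)
      = (xs.take b.toNat).drop a.toNat := by
  induction hn : (b - a).toNat generalizing a with
  | zero =>
    rw [PySem.List.pyRange_one_eq_nil (by omega), List.map_nil, Eq.comm,
      List.drop_eq_nil_iff]
    simp only [List.length_take]
    omega
  | succ n ih =>
    have hab : a < b := by omega
    have hlt : a.toNat < (xs.take b.toNat).length := by
      simp only [List.length_take]; omega
    rw [PySem.List.pyRange_one_cons (by omega), List.map_cons,
      List.drop_eq_getElem_cons hlt, List.getElem_take,
      PySem.List.pyGetD_eq_getElem xs d h0 (by omega),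
      show a.toNat + 1 = (a + 1).toNat by omega,
      ih (a + 1) (by omega) (by omega)]

-- ===== VERDICT (by name: the statement is the Claim_ definition above) =====
theorem seed_center_with_grass_spec : Claim_equal_seed_center_with_grass := by
  intro map_data radius _hdom hpre
  unfold Spec_seed_center_with_grass seed_center_with_grass seed_center_with_grass_alt
  obtain ⟨hne, hlen⟩ := hpre
  simp only [pvZone] at hlen
  simp only [PySem.List.foldl_append_singleton_eq_map, List.nil_append]
  set rows : Int := (map_data.length : Int) with hrows
  set cols : Int := PySem.Str.len (map_data.headD "") with hcols
  set row_mid := PySem.Int.floordiv rows 2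
  set col_mid := PySem.Int.floordiv cols 2
  set r_min := max (row_mid - radius) 0 with hrmin
  set r_max := min (row_mid + radius) (rows - 1) with hrmax
  set c_min := max (col_mid - radius) 0 with hcmin
  set c_max := min (col_mid + radius) (cols - 1) with hcmax
  have hr0 : 0 ≤ r_min := le_max_right _ _
  have hc0 : 0 ≤ c_min := le_max_right _ _
  have hrrows : r_max ≤ rows - 1 := min_le_right _ _
  have hrowspos : (1 : Int) ≤ rows := by
    rw [hrows]; exact_mod_cast Nat.one_le_iff_ne_zero.mpr (by simpa using hne)
  by_cases hz : r_max < r_min ∨ c_max < c_min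
  · rw [if_pos hz]
    have hnone : ∀ r ∈ PySem.List.pyRange 0 rows 1,
        (PySem.List.pyRange 0 cols 1).foldl (fun rl c =>
          if r_min ≤ r ∧ r ≤ r_max ∧ c_min ≤ c ∧ c ≤ c_max then rl.set c.toNat '2' else rl)
          (PySem.List.pyGetD map_data r "").toList = (PySem.List.pyGetD map_data r "").toList := by
      intro r _
      exact inner_fold_noop cols _ _ (fun c hcon => by rcases hz with h | h <;> omega)
    calc (PySem.List.pyRange 0 rows 1).map (fun r =>
            String.ofList ((PySem.List.pyRange 0 cols 1).foldl (fun rl c =>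
              if r_min ≤ r ∧ r ≤ r_max ∧ c_min ≤ c ∧ c ≤ c_max then rl.set c.toNat '2' else rl)
              (PySem.List.pyGetD map_data r "").toList))
        = (PySem.List.pyRange 0 rows 1).map (fun r => PySem.List.pyGetD map_data r "") := by
          apply List.map_congr_left
          intro r hr
          rw [hnone r hr, String.ofList_toList]
      _ = map_data := by
          rw [hrows, map_pyGetD_pyRange_seg map_data "" 0 (map_data.length : Int) le_rfl le_rfl]
          simp
  · rw [if_neg hz]
    rw [not_or, not_lt, not_lt] at hz
    obtain ⟨hzr, hzc⟩ := hz
    rw [PySem.List.pyRange_one_append 0 (r_max + 1) rows (by omega) (by omega),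
      PySem.List.pyRange_one_append 0 r_min (r_max + 1) hr0 (by omega), List.map_append,
      List.map_append]
    congr 1
    · congr 1
      · -- rows above the zone: the inner fold never fires
        calc (PySem.List.pyRange 0 r_min 1).map (fun r =>
                String.ofList ((PySem.List.pyRange 0 cols 1).foldl (fun rl c =>
                  if r_min ≤ r ∧ r ≤ r_max ∧ c_min ≤ c ∧ c ≤ c_max then rl.set c.toNat '2' else rl)
                  (PySem.List.pyGetD map_data r "").toList))
            = (PySem.List.pyRange 0 r_min 1).map (fun r => PySem.List.pyGetD map_data r "") := by
              apply List.map_congr_left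
              intro r hr
              obtain ⟨_, hru⟩ := PySem.List.mem_pyRange_one.mp hr
              rw [inner_fold_noop cols _ _ (fun c hcon => by omega), String.ofList_toList]
          _ = PySem.List.slice map_data none (some r_min) := by
              rw [map_pyGetD_pyRange_seg map_data "" 0 r_min le_rfl (by omega),
                PySem.List.slice_to map_data hr0]
              simp
      · -- the in-zone band of rows
        apply List.map_congr_left
        intro r hr
        obtain ⟨hrl, hru⟩ := PySem.List.mem_pyRange_one.mp hr
        have hrn' : r.toNat < map_data.length := by omega
        have hget : PySem.List.pyGetD map_data r "" = map_data[r.toNat] :=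
          PySem.List.pyGetD_eq_getElem map_data "" (by omega) (by omega)
        have hrtn : ((r.toNat : Nat) : Int) = r := by omega
        have hcc : c_max < cols := by omega
        have hlr : c_max < ((map_data[r.toNat] : String).toList.length : Int) := by
          have := hlen r.toNat hrn' (by omega) (by omega) hzc
          rwa [List.getD_eq_getElem _ _ hrn'] at this
        rw [PySem.List.foldl_congr_mem _ _
            (fun rl c => if c_min ≤ c ∧ c ≤ c_max then rl.set c.toNat '2' else rl) _
            (by intro acc c _
                by_cases hc1 : c_min ≤ c <;> by_cases hc2 : c ≤ c_max <;>
                  simp [hc1, hc2, show r_min ≤ r from hrl, show r ≤ r_max by omega]),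
          hget, inner_fold_eq cols c_min c_max _ hc0 hzc hcc hlr]
        apply String.toList_inj.mp
        rw [String.toList_ofList, String.toList_append, String.toList_append,
          String.toList_ofList, PySem.Str.toList_slice, PySem.Str.toList_slice,
          PySem.Chars.slice_eq_listSlice, PySem.Chars.slice_eq_listSlice,
          PySem.List.slice_to _ hc0,
          PySem.List.slice_from _ (show (0:Int) ≤ c_max + 1 by omega)]
    · -- rows below the zone: the inner fold never fires
      calc (PySem.List.pyRange (r_max + 1) rows 1).map (fun r =>
              String.ofList ((PySem.List.pyRange 0 cols 1).foldl (fun rl c =>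
                if r_min ≤ r ∧ r ≤ r_max ∧ c_min ≤ c ∧ c ≤ c_max then rl.set c.toNat '2' else rl)
                (PySem.List.pyGetD map_data r "").toList))
          = (PySem.List.pyRange (r_max + 1) rows 1).map (fun r => PySem.List.pyGetD map_data r "") := by
            apply List.map_congr_left
            intro r hr
            obtain ⟨hrl, _⟩ := PySem.List.mem_pyRange_one.mp hr
            rw [inner_fold_noop cols _ _ (fun c hcon => by omega), String.ofList_toList]
        _ = PySem.List.slice map_data (some (r_max + 1)) none := by
            rw [hrows, map_pyGetD_pyRange_seg map_data "" (r_max + 1) (map_data.length : Int)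
                (by omega) le_rfl,
              PySem.List.slice_from map_data (show (0:Int) ≤ r_max + 1 by omega)]
            simp
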